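-- pv_equiv track=rewrite | github.com/zhongxiao37/codewar | 4kyuMysteryFunction.py | mystery_inv
-- ===== SOURCE A (Python) =====
-- def mystery_inv(n):
--     n_bits = list("{0:b}".format(n))
--     m = len(n_bits)
--     idx = None
--     for i in range(m):
--         s = n_bits.pop()
--         if i == 0:
--             idx = int(s)
--         elif s == '0':
--             pass
--         elif s == '1':
--             idx = 2 ** (i + 1) - idx - 1
--
--     return idx
-- ===== SOURCE B (Python) =====
-- def mystery_inv(n):
--     b = 0
--     m = abs(n)
--     while m:
--         b ^= m
--         m >>= 1
--     return b
-- ===== Notes on version B (the rewrite author's own statement) =====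
-- stated objective: idiomatic
-- what changed: Replaces building a binary-string character list, popping characters and applying the Gray reflection formula with the standard Gray-to-binary XOR fold (b ^= m; m >>= 1) on the absolute value of n.
import Mathlib
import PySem

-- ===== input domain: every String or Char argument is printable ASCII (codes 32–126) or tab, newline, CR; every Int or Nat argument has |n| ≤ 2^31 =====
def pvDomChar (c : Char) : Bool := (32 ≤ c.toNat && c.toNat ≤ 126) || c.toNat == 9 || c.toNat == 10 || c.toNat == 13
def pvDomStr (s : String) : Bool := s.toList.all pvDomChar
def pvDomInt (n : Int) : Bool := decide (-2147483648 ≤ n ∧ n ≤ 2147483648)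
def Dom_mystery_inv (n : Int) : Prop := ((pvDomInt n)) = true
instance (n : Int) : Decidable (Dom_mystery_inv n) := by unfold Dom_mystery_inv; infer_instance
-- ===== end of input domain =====

-- B replaces A's binary-string character list and reflection formula with the standard
-- Gray-to-binary XOR fold on the absolute value of n (a plainer, idiomatic decode).


-- ===== PORT A =====
-- one iteration of A's for-body: s is the popped char, i the loop counter, idx Python's idx
-- (idx = none models Python's None; Python's `2 ** (i + 1) - idx - 1` is only reached after
-- iteration i = 0 has set idx, so the Option.map is exact on every reachable state)
def aStep (i : Nat) (s : Char) (idx : Option Int) : Option Int :=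
  if i = 0 then PySem.Int.ofStr? (String.mk [s])
  else if s = '0' then idx
  else if s = '1' then idx.map (fun v => 2 ^ (i + 1) - v - 1)
  else idx

-- `for i in range(m): s = n_bits.pop(); …` — fuel is the remaining number of iterations;
-- pop? is never none because the loop runs exactly (initial length) times
def aLoop : Nat → Nat → List Char → Option Int → Option Int
  | 0, _, _, idx => idx
  | fuel + 1, i, bits, idx =>
    match PySem.List.pop? bits with
    | none => idx
    | some (s, rest) => aLoop fuel (i + 1) rest (aStep i s idx)

def mystery_inv (n : Int) : Int :=
  let n_bits := PySem.Int.toBinChars n    -- list("{0:b}".format(n))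
  let m := n_bits.length
  -- Python returns idx; m ≥ 1 always, so idx is some; the .getD 0 default is unreachable
  (aLoop m 0 n_bits none).getD 0

-- ===== PORT B =====
-- Source B's while loop; b and m stay nonnegative throughout (m starts as abs(n)),
-- so Nat ^^^ and m / 2 (= m >>= 1 on a nonnegative int) are exact
def altLoop (b m : Nat) : Nat :=
  if h : m = 0 then b else altLoop (b ^^^ m) (m / 2)
termination_by m
decreasing_by exact Nat.div_lt_self (Nat.pos_of_ne_zero h) one_lt_two

def mystery_inv_alt (n : Int) : Int := ((altLoop 0 n.natAbs : Nat) : Int)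

-- ===== PRECONDITION & SPEC =====
def Spec_mystery_inv (n : Int) (out : Int) : Prop := out = mystery_inv_alt n
instance (n : Int) (out : Int) : Decidable (Spec_mystery_inv n out) := by unfold Spec_mystery_inv; infer_instance

-- ===== CLAIM (what is proved, stated in full; the proofs are below) =====
def Claim_equal_mystery_inv : Prop := ∀ (n : Int), Dom_mystery_inv n → Spec_mystery_inv n (mystery_inv n)

-- ===== LEMMAS AND PROOFS =====

-- the Gray-to-binary decode both programs compute: G m = m ^^^ m/2 ^^^ m/4 ^^^ …
def G (m : Nat) : Nat :=
  if h : m = 0 then 0 else m ^^^ G (m / 2)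
termination_by m
decreasing_by exact Nat.div_lt_self (Nat.pos_of_ne_zero h) one_lt_two

lemma G_eq (m : Nat) : G m = m ^^^ G (m / 2) := by
  by_cases h : m = 0
  · subst h; simp [G]
  · rw [G, dif_neg h]

lemma G_zero : G 0 = 0 := by simp [G]

lemma G_one : G 1 = 1 := by rw [G_eq]; norm_num [G_zero]

lemma G_lt {i : Nat} : ∀ {y : Nat}, y < 2 ^ i → G y < 2 ^ i := by
  intro y
  induction y using Nat.strong_induction_on with
  | _ y ih =>
    intro hy
    rcases Nat.eq_zero_or_pos y with h0 | h0
    · subst h0; rw [G_zero]; positivity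
    · rw [G_eq]
      exact Nat.xor_lt_two_pow hy (ih (y / 2) (Nat.div_lt_self h0 one_lt_two)
        (lt_of_le_of_lt (Nat.div_le_self _ _) hy))

-- Source B's loop is an XOR accumulator for G
lemma altLoop_eq (b m : Nat) : altLoop b m = b ^^^ G m := by
  induction m using Nat.strong_induction_on generalizing b with
  | _ m ih =>
    by_cases h : m = 0
    · subst h; simp [altLoop, G]
    · rw [altLoop, dif_neg h, ih (m / 2) (Nat.div_lt_self (Nat.pos_of_ne_zero h) one_lt_two),
        G_eq m, Nat.xor_assoc]

-- xor arithmetic: 2^m ^^^ a = 2^m + a and (2^m - 1) ^^^ a = 2^m - 1 - a for a < 2^m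
lemma xor_char (z w : Nat) (h1 : z % 2 = w % 2) (h2 : z / 2 = w / 2) : z = w := by omega

lemma xor_div_two (a b : Nat) : (a ^^^ b) / 2 = a / 2 ^^^ b / 2 := by
  simpa [Nat.shiftRight_one] using Nat.shiftRight_xor_distrib (i := 1) (a := a) (b := b)

lemma pow_xor_eq_add : ∀ (m a : Nat), a < 2 ^ m → 2 ^ m ^^^ a = 2 ^ m + a := by
  intro m
  induction m with
  | zero => intro a ha; interval_cases a; decide
  | succ k ih =>
    intro a ha
    apply xor_char
    · rw [Nat.xor_mod_two_eq]
    · rw [xor_div_two]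
      have h2 : (2 : Nat) ^ (k + 1) / 2 = 2 ^ k := by
        rw [pow_succ]; omega
      rw [h2, ih (a / 2) (by rw [pow_succ] at ha; omega)]
      rw [pow_succ] at *; omega

lemma pred_pow_xor_eq_sub : ∀ (m a : Nat), a < 2 ^ m → (2 ^ m - 1) ^^^ a = 2 ^ m - 1 - a := by
  intro m
  induction m with
  | zero => intro a ha; interval_cases a; decide
  | succ k ih =>
    intro a ha
    apply xor_char
    · rw [Nat.xor_mod_two_eq]
      have : (2 : Nat) ^ (k + 1) % 2 = 0 := by
        rw [pow_succ]; omega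
      omega
    · rw [xor_div_two]
      have h2 : ((2 : Nat) ^ (k + 1) - 1) / 2 = 2 ^ k - 1 := by
        rw [pow_succ]; omega
      rw [h2, ih (a / 2) (by rw [pow_succ] at ha; omega)]
      rw [pow_succ] at *; omega

-- A's reflection step is exactly G on the next bit: G(y + 2^i) = 2^(i+1) - 1 - G y
lemma G_reflect : ∀ (i y : Nat), y < 2 ^ i → G (y + 2 ^ i) = 2 ^ (i + 1) - 1 - G y := by
  intro i
  induction i with
  | zero =>
    intro y hy
    interval_cases y
    norm_num [G_zero, G_one]
  | succ k ih =>
    intro y hy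
    have hy2 : y / 2 < 2 ^ k := by rw [pow_succ] at hy; omega
    have hg : G (y / 2) < 2 ^ k := G_lt hy2
    have hdiv : (y + 2 ^ (k + 1)) / 2 = y / 2 + 2 ^ k := by rw [pow_succ]; omega
    rw [G_eq (y + 2 ^ (k + 1)), hdiv, ih (y / 2) hy2]
    have e1 : (2 : Nat) ^ (k + 1) - 1 - G (y / 2) = (2 ^ (k + 1) - 1) ^^^ G (y / 2) :=
      (pred_pow_xor_eq_sub (k + 1) _ (lt_of_lt_of_le hg (by rw [pow_succ]; omega))).symm
    have e2 : y + 2 ^ (k + 1) = 2 ^ (k + 1) ^^^ y := by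
      rw [pow_xor_eq_add (k + 1) y hy]; omega
    rw [e1, e2]
    have e3 : 2 ^ (k + 1) ^^^ y ^^^ ((2 ^ (k + 1) - 1) ^^^ G (y / 2))
        = (2 ^ (k + 1) ^^^ (2 ^ (k + 1) - 1)) ^^^ (y ^^^ G (y / 2)) := by
      rw [Nat.xor_assoc, Nat.xor_assoc]
      congr 1
      rw [← Nat.xor_assoc, Nat.xor_comm y (2 ^ (k + 1) - 1), Nat.xor_assoc]
    have e4 : 2 ^ (k + 1) ^^^ (2 ^ (k + 1) - 1) = 2 ^ (k + 2) - 1 := by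
      rw [pow_xor_eq_add (k + 1) _ (Nat.sub_lt (by positivity) one_pos)]
      have h5 : (0:Nat) < 2 ^ (k + 1) := by positivity
      rw [pow_succ 2 (k + 1)]; omega
    have hxy : y ^^^ G (y / 2) < 2 ^ (k + 2) := by
      have h1 : y < 2 ^ (k + 2) := lt_of_lt_of_le hy (Nat.pow_le_pow_right (by omega) (by omega))
      have h2 : G (y / 2) < 2 ^ (k + 2) :=
        lt_of_lt_of_le hg (Nat.pow_le_pow_right (by omega) (by omega))
      exact Nat.xor_lt_two_pow h1 h2
    rw [e3, e4, pred_pow_xor_eq_sub (k + 2) _ hxy, ← G_eq y]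

-- LSB-first binary digit list (the reverse of Nat.toDigits 2)
def binRev (a : Nat) : List Char :=
  if h : a < 2 then [Nat.digitChar a]
  else Nat.digitChar (a % 2) :: binRev (a / 2)
termination_by a
decreasing_by exact Nat.div_lt_self (by omega) one_lt_two

lemma binRev_lt {a : Nat} (ha : a < 2) : binRev a = [Nat.digitChar a] := by
  conv_lhs => rw [binRev]
  rw [dif_pos ha]

lemma binRev_ge {a : Nat} (ha : ¬ a < 2) : binRev a = Nat.digitChar (a % 2) :: binRev (a / 2) := by
  conv_lhs => rw [binRev]
  rw [dif_neg ha]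

lemma toDigitsCore_eq : ∀ (f a : Nat) (ds : List Char), a < f →
    Nat.toDigitsCore 2 f a ds = (binRev a).reverse ++ ds := by
  intro f
  induction f with
  | zero => intro a ds h; omega
  | succ f ih =>
    intro a ds h
    by_cases h2 : a / 2 = 0
    · have ha : a < 2 := by omega
      have hm : a % 2 = a := Nat.mod_eq_of_lt ha
      simp [Nat.toDigitsCore, h2, binRev_lt ha, hm]
    · have ha : ¬ a < 2 := by omega
      rw [show Nat.toDigitsCore 2 (f + 1) a ds
            = Nat.toDigitsCore 2 f (a / 2) (Nat.digitChar (a % 2) :: ds) by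
          simp [Nat.toDigitsCore, h2]]
      rw [ih (a / 2) _ (by omega), binRev_ge ha]
      simp

lemma toDigits_two (a : Nat) : Nat.toDigits 2 a = (binRev a).reverse := by
  rw [Nat.toDigits, toDigitsCore_eq (a + 1) a [] (Nat.lt_succ_self a), List.append_nil]

-- A's pop-from-the-end loop is a head-first walk over the reversed list
def revLoop : List Char → Nat → Option Int → Option Int
  | [], _, idx => idx
  | s :: rest, i, idx => revLoop rest (i + 1) (aStep i s idx)

lemma aLoop_rev : ∀ (rbits : List Char) (i : Nat) (idx : Option Int),
    aLoop rbits.length i rbits.reverse idx = revLoop rbits i idx := by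
  intro rbits
  induction rbits with
  | nil => intro i idx; simp [aLoop, revLoop]
  | cons s rest ih =>
    intro i idx
    rw [List.reverse_cons, show (s :: rest).length = rest.reverse.length + 1 by simp]
    rw [show aLoop (rest.reverse.length + 1) i (rest.reverse ++ [s]) idx
          = aLoop rest.reverse.length (i + 1) rest.reverse (aStep i s idx) by
        simp [aLoop, PySem.List.pop?_last]]
    rw [show rest.reverse.length = rest.length by simp, ih]
    rfl

-- trailing '-' of a negative input is popped last at counter ≥ 1 and ignored by A
lemma revLoop_append (c : Char) : ∀ (xs : List Char) (i : Nat) (idx : Option Int),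
    revLoop (xs ++ [c]) i idx = aStep (i + xs.length) c (revLoop xs i idx) := by
  intro xs
  induction xs with
  | nil => intro i idx; simp [revLoop]
  | cons s rest ih =>
    intro i idx
    show revLoop (rest ++ [c]) (i + 1) (aStep i s idx)
        = aStep (i + (s :: rest).length) c (revLoop rest (i + 1) (aStep i s idx))
    rw [ih, show i + 1 + rest.length = i + (s :: rest).length by
      simp only [List.length_cons]; omega]

-- the loop invariant: with low bits y already decoded, the remaining digits binRev a
-- starting at position i ≥ 1 take idx = G y to G (y + 2^i * a)
lemma revLoop_binRev : ∀ (a i y : Nat), 1 ≤ i → y < 2 ^ i →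
    revLoop (binRev a) i (some ((G y : Nat) : Int))
      = some ((G (y + 2 ^ i * a) : Nat) : Int) := by
  intro a
  induction a using Nat.strong_induction_on with
  | _ a ih =>
    intro i y hi hy
    have hGy : G y < 2 ^ i := G_lt hy
    have hstep1 : aStep i '1' (some ((G y : Nat) : Int)) = some ((G (y + 2 ^ i) : Nat) : Int) := by
      have hne : i ≠ 0 := by omega
      rw [aStep, if_neg hne, if_neg (by decide : ¬ ('1' : Char) = '0'),
        if_pos (rfl : ('1' : Char) = '1'), Option.map_some]
      rw [G_reflect i y hy]
      have h1 : 1 + G y ≤ 2 ^ (i + 1) := by rw [pow_succ]; omega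
      congr 1
      rw [Nat.sub_sub, Nat.cast_sub h1]
      push_cast
      ring
    by_cases ha : a < 2
    · rw [binRev, dif_pos ha]
      interval_cases a
      · show revLoop [] (i + 1) (aStep i '0' (some ((G y : Nat) : Int))) = _
        have hne : i ≠ 0 := by omega
        simp [revLoop, aStep, hne]
      · show revLoop [] (i + 1) (aStep i '1' (some ((G y : Nat) : Int))) = _
        rw [hstep1]
        simp [revLoop]
    · rw [binRev, dif_neg ha]
      have hy1 : y + 2 ^ i * (a % 2) < 2 ^ (i + 1) := by
        have : a % 2 ≤ 1 := by omega
        have : 2 ^ i * (a % 2) ≤ 2 ^ i := by nlinarith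
        rw [pow_succ]; omega
      have harith : y + 2 ^ i * (a % 2) + 2 ^ (i + 1) * (a / 2) = y + 2 ^ i * a := by
        rw [pow_succ]; nlinarith [Nat.div_add_mod a 2]
      rcases Nat.mod_two_eq_zero_or_one a with hm | hm
      · show revLoop (binRev (a / 2)) (i + 1)
            (aStep i (Nat.digitChar (a % 2)) (some ((G y : Nat) : Int))) = _
        rw [hm]
        have hne : i ≠ 0 := by omega
        rw [show aStep i (Nat.digitChar 0) (some ((G y : Nat) : Int))
              = some ((G y : Nat) : Int) by simp [aStep, Nat.digitChar, hne]]
        rw [ih (a / 2) (Nat.div_lt_self (by omega) one_lt_two) (i + 1) y (by omega)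
          (lt_of_lt_of_le hy (by rw [pow_succ]; omega))]
        rw [show y + 2 ^ (i + 1) * (a / 2) = y + 2 ^ i * a by
          rw [hm] at harith; simpa using harith]
      · show revLoop (binRev (a / 2)) (i + 1)
            (aStep i (Nat.digitChar (a % 2)) (some ((G y : Nat) : Int))) = _
        rw [hm, show Nat.digitChar 1 = '1' by rfl, hstep1]
        rw [ih (a / 2) (Nat.div_lt_self (by omega) one_lt_two) (i + 1) (y + 2 ^ i) (by omega)
          (by rw [hm] at hy1; simpa using hy1)]
        rw [show y + 2 ^ i + 2 ^ (i + 1) * (a / 2) = y + 2 ^ i * a by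
          rw [hm] at harith; simpa using harith]

lemma revLoop_top (a : Nat) : revLoop (binRev a) 0 none = some ((G a : Nat) : Int) := by
  by_cases ha : a < 2
  · rw [binRev_lt ha]
    interval_cases a
    · show revLoop [Nat.digitChar 0] 0 none = some ((G 0 : Nat) : Int)
      rw [G_zero]; decide
    · show revLoop [Nat.digitChar 1] 0 none = some ((G 1 : Nat) : Int)
      rw [G_one]; decide
  · rw [binRev_ge ha]
    show revLoop (binRev (a / 2)) 1 (aStep 0 (Nat.digitChar (a % 2)) none) = _
    have hstep : aStep 0 (Nat.digitChar (a % 2)) none = some ((G (a % 2) : Nat) : Int) := by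
      rcases Nat.mod_two_eq_zero_or_one a with hm | hm
      · rw [hm, G_zero]; decide
      · rw [hm, G_one]; decide
    rw [hstep, revLoop_binRev (a / 2) 1 (a % 2) le_rfl (by omega)]
    rw [show a % 2 + 2 ^ 1 * (a / 2) = a by omega]

-- binRev is never empty, so a negative input's '-' is processed at counter ≥ 1
lemma binRev_ne_nil (a : Nat) : binRev a ≠ [] := by
  by_cases ha : a < 2
  · rw [binRev, dif_pos ha]; simp
  · rw [binRev, dif_neg ha]; simp

lemma mystery_inv_eq_G (n : Int) : mystery_inv n = ((G n.natAbs : Nat) : Int) := by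
  show (aLoop (PySem.Int.toBinChars n).length 0 (PySem.Int.toBinChars n) none).getD 0
      = ((G n.natAbs : Nat) : Int)
  by_cases hn : n < 0
  · have hb : PySem.Int.toBinChars n = '-' :: (binRev n.natAbs).reverse := by
      simp only [PySem.Int.toBinChars, if_pos hn, toDigits_two]
    have hrev2 : '-' :: (binRev n.natAbs).reverse = (binRev n.natAbs ++ ['-']).reverse := by simp
    rw [hb, hrev2, List.length_reverse, aLoop_rev, revLoop_append, revLoop_top]
    have hpos : 1 ≤ (binRev n.natAbs).length :=
      List.length_pos_iff.mpr (binRev_ne_nil n.natAbs)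
    rw [show aStep (0 + (binRev n.natAbs).length) '-' (some ((G n.natAbs : Nat) : Int))
          = some ((G n.natAbs : Nat) : Int) by
        rw [aStep, if_neg (by omega : ¬ 0 + (binRev n.natAbs).length = 0),
          if_neg (by decide : ¬ ('-' : Char) = '0'), if_neg (by decide : ¬ ('-' : Char) = '1')]]
    rfl
  · have hb : PySem.Int.toBinChars n = (binRev n.natAbs).reverse := by
      simp only [PySem.Int.toBinChars, if_neg hn, toDigits_two,
        show n.toNat = n.natAbs by omega]
    rw [hb, List.length_reverse, aLoop_rev, revLoop_top]
    rfl

-- ===== VERDICT (by name: the statement is the Claim_ definition above) =====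
theorem mystery_inv_spec : Claim_equal_mystery_inv := by
  intro n _
  show mystery_inv n = mystery_inv_alt n
  rw [mystery_inv_eq_G, mystery_inv_alt, altLoop_eq, Nat.zero_xor]
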